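-- pv_equiv track=rewrite | github.com/cameron-simpson/css | cs/lex.py | unctrl
-- ===== SOURCE A (Python) =====
-- import string
--
-- ord_space=ord(' ')
--
-- def unctrl(s,tabsize=8):
--   s2=''
--   sofar=0
--   for i in range(len(s)):
--     ch=s[i]
--     ch2=None
--     if ch == '\t':
--       pass
--     elif ch == '\f':
--       ch2='\\f'
--     elif ch == '\n':
--       ch2='\\n'
--     elif ch == '\r':
--       ch2='\\r'
--     elif ch == '\v':
--       ch2='\\v'
--     else:
--       o=ord(ch)
--       if o < ord_space or string.printable.find(ch) == -1:
--         if o >= 256: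
--           ch2="\\u%04x"%o
--         else:
--           ch2="\\%03o"%o
--
--     if ch2 is not None:
--       import cs.misc
--       cs.misc.progress("ch2=["+ch2+"]")
--       if sofar < i:
--         s2+=s[sofar:i]
--       s2+=ch2
--       sofar=i+1
--
--   if sofar < len(s):
--     s2+=s[sofar:]
--
--   return s2.expandtabs(tabsize)
-- ===== SOURCE B (Python) =====
-- def _esc(ch):
--     if ch == '\t' or ' ' <= ch <= '~':
--         return ch
--     if ch == '\f':
--         return '\\f'
--     if ch == '\n':
--         return '\\n'
--     if ch == '\r':
--         return '\\r'
--     if ch == '\v':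
--         return '\\v'
--     o = ord(ch)
--     return ('\\%03o' % o) if o < 256 else ('\\u%04x' % o)
--
-- def unctrl(s, tabsize=8):
--     return ''.join(map(_esc, s)).expandtabs(tabsize)
-- ===== Notes on version B (the rewrite author's own statement) =====
-- stated objective: idiomatic
-- what changed: Replaces the index loop with run-copying via sofar and slices by a per-character escape function mapped over the string and joined, then expandtabs; return value only (B does not emit A's cs.misc.progress side effect).
import Mathlib
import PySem

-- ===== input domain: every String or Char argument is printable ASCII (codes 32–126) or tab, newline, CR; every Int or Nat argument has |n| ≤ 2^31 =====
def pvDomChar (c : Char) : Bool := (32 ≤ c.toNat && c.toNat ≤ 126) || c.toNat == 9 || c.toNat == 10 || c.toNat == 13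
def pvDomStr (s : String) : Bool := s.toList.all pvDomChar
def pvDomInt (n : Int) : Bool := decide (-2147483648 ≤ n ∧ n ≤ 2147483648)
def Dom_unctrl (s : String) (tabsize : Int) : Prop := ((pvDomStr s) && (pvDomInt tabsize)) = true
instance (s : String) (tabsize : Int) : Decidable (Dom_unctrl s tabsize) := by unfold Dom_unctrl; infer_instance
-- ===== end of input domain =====

-- B replaces A's run-copying index loop (sofar/slices) by a per-character escape function
-- mapped over the string and joined, then expandtabs (idiomatic). Return-value equivalence
-- only: A also calls cs.misc.progress once per escaped character, a side effect B omits.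

-- ===== shared library helpers (ports of str.expandtabs and of '%03o'/'%04x' formatting) =====

-- str.expandtabs(tabsize), CPython semantics: a tab appends tabsize - col % tabsize spaces
-- when tabsize > 0 (and nothing otherwise); '\n'/'\r' reset the column to 0.
def pyExpandTabsAux (tabsize : Int) : List Char → Nat → List Char
  | [], _ => []
  | c :: cs, col =>
    if c = '\t' then
      if 0 < tabsize then
        let incr := (tabsize - PySem.Int.mod (col : Int) tabsize).toNat
        List.replicate incr ' ' ++ pyExpandTabsAux tabsize cs (col + incr)
      else pyExpandTabsAux tabsize cs col
    else if c = '\n' ∨ c = '\r' then c :: pyExpandTabsAux tabsize cs 0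
    else c :: pyExpandTabsAux tabsize cs (col + 1)

def pyExpandTabs (tabsize : Int) (l : List Char) : String :=
  String.ofList (pyExpandTabsAux tabsize l 0)

def padZeros (w : Nat) (ds : List Char) : List Char :=
  List.replicate (w - ds.length) '0' ++ ds

-- "\\%03o" % o  (o < 256 at the call sites, so 3 digits suffice, as in Python)
def octEsc (o : Nat) : List Char := '\\' :: padZeros 3 (Nat.toDigits 8 o)
-- "\\u%04x" % o (Nat.toDigits 16 is lowercase, like %x)
def hexEsc (o : Nat) : List Char := '\\' :: 'u' :: padZeros 4 (Nat.toDigits 16 o)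

-- ===== PORT A =====

-- string.printable, as a literal character list; A's "string.printable.find(ch) == -1"
-- is ported as ¬ pyPrintable.contains ch (find = -1 iff the char does not occur).
def pyPrintable : List Char :=
  "0123456789abcdefghijklmnopqrstuvwxyzABCDEFGHIJKLMNOPQRSTUVWXYZ!\"#$%&'()*+,-./:;<=>?@[\\]^_`{|}~ \t\n\r\u000b\u000c".toList

-- the ch2 computation of A's loop body (None = no escape)
def aCh2 (ch : Char) : Option (List Char) :=
  if ch = '\t' then none
  else if ch = '\x0c' then some ['\\', 'f']
  else if ch = '\n' then some ['\\', 'n']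
  else if ch = '\r' then some ['\\', 'r']
  else if ch = '\x0b' then some ['\\', 'v']
  else
    let o := ch.toNat
    if o < 32 ∨ ¬ pyPrintable.contains ch then
      if 256 ≤ o then some (hexEsc o) else some (octEsc o)
    else none

-- one iteration of A's loop: state (s2, sofar); the cs.misc.progress call is a side
-- effect only (a progress message), so it is not modelled.
def aStep (cs : List Char) (acc : List Char × Int) (i : Int) : List Char × Int :=
  let ch := PySem.List.pyGetD cs i ' '
  match aCh2 ch with
  | none => acc
  | some e =>
      ((if acc.2 < i then acc.1 ++ PySem.List.slice cs (some acc.2) (some i) else acc.1) ++ e,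
       i + 1)

-- the final 'if sofar < len(s): s2 += s[sofar:]'
def aFinish (cs : List Char) (fin : List Char × Int) : List Char :=
  if fin.2 < (cs.length : Int) then fin.1 ++ PySem.List.slice cs (some fin.2) none else fin.1

def unctrl (s : String) (tabsize : Int) : String :=
  pyExpandTabs tabsize
    (aFinish s.toList ((PySem.List.pyRange 0 (s.toList.length : Int) 1).foldl (aStep s.toList) ([], 0)))

-- ===== PORT B =====

-- Source B's _esc, returning the (possibly escaped) character as a character list
def bEsc (ch : Char) : List Char :=
  -- ' ' <= ch <= '~' compares code points: 32 ≤ ord ch ≤ 126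
  if ch = '\t' ∨ (32 ≤ ch.toNat ∧ ch.toNat ≤ 126) then [ch]
  else if ch = '\x0c' then ['\\', 'f']
  else if ch = '\n' then ['\\', 'n']
  else if ch = '\r' then ['\\', 'r']
  else if ch = '\x0b' then ['\\', 'v']
  else if ch.toNat < 256 then octEsc ch.toNat else hexEsc ch.toNat

-- ''.join(map(_esc, s)).expandtabs(tabsize)
def unctrl_alt (s : String) (tabsize : Int) : String :=
  pyExpandTabs tabsize (s.toList.flatMap bEsc)

-- ===== PRECONDITION & SPEC =====

-- Pre_ excludes only tabsize ≥ 2^31 (which Dom admits at its edge): there str.expandtabs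
-- raises OverflowError in A and in B alike.
def Pre_unctrl (s : String) (tabsize : Int) : Prop := tabsize ≤ 2147483647

instance (s : String) (tabsize : Int) : Decidable (Pre_unctrl s tabsize) := by
  unfold Pre_unctrl; infer_instance

def pvWitness_unctrl : String × Int := ("a\tbc d!\n", 8)

def Spec_unctrl (s : String) (tabsize : Int) (out : String) : Prop := out = unctrl_alt s tabsize
instance (s : String) (tabsize : Int) (out : String) : Decidable (Spec_unctrl s tabsize out) := by
  unfold Spec_unctrl; infer_instance

-- ===== CLAIM (what is proved, stated in full; the proofs are below) =====
def Claim_equal_unctrl : Prop := ∀ (s : String) (tabsize : Int), Dom_unctrl s tabsize →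
  Pre_unctrl s tabsize → Spec_unctrl s tabsize (unctrl s tabsize)

-- ===== LEMMAS AND PROOFS =====

-- what A appends for one character (the escape, or the character itself copied by a slice)
def escA (c : Char) : List Char :=
  match aCh2 c with
  | none => [c]
  | some e => e

set_option maxRecDepth 4000 in
lemma printable_mem : ∀ n : Nat, n < 127 → 32 ≤ n → pyPrintable.contains (Char.ofNat n) = true := by
  decide

lemma aCh2_none {c : Char} (h1' : 32 ≤ c.toNat) (h2' : c.toNat ≤ 126) : aCh2 c = none := by
  have hmem : pyPrintable.contains c = true := by
    have := printable_mem c.toNat (by omega) h1'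
    simpa [Char.ofNat_toNat] using this
  have ht : c ≠ '\t' := by rintro rfl; exact absurd h1' (by decide)
  have hf : c ≠ '\x0c' := by rintro rfl; exact absurd h1' (by decide)
  have hn : c ≠ '\n' := by rintro rfl; exact absurd h1' (by decide)
  have hr : c ≠ '\r' := by rintro rfl; exact absurd h1' (by decide)
  have hv : c ≠ '\x0b' := by rintro rfl; exact absurd h1' (by decide)
  simp only [aCh2, if_neg ht, if_neg hf, if_neg hn, if_neg hr, if_neg hv]
  rw [if_neg]
  simp only [not_or, not_not]
  exact ⟨by omega, by simpa using hmem⟩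

-- A appends per character exactly what B's escape function produces, on the domain's chars
lemma escA_eq_bEsc {c : Char} (h : pvDomChar c = true) : escA c = bEsc c := by
  simp only [pvDomChar, Bool.or_eq_true, Bool.and_eq_true, decide_eq_true_eq, beq_iff_eq] at h
  have hofn : Char.ofNat c.toNat = c := Char.ofNat_toNat c
  rcases h with ((⟨h1, h2⟩ | h9) | h10) | h13
  · have h1' : 32 ≤ c.toNat := by simpa using h1
    have h2' : c.toNat ≤ 126 := by simpa using h2
    rw [escA, aCh2_none h1' h2']
    rw [bEsc, if_pos (Or.inr ⟨h1', h2'⟩)]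
  · have hc : c = '\t' := by rw [← hofn, h9]
    rw [hc]; decide
  · have hc : c = '\n' := by rw [← hofn, h10]
    rw [hc]; decide
  · have hc : c = '\r' := by rw [← hofn, h13]
    rw [hc]; decide

lemma flatMap_escA_eq (l : List Char) (h : ∀ c ∈ l, pvDomChar c = true) :
    l.flatMap escA = l.flatMap bEsc := by
  induction l with
  | nil => rfl
  | cons x xs ih =>
      simp only [List.flatMap_cons]
      rw [escA_eq_bEsc (h x (by simp)), ih (fun c hc => h c (by simp [hc]))]

-- loop invariant of A's scan: sofar trails the scan point, and s2 plus the pending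
-- uncopied run s[sofar:k] equals the escaped image of the processed prefix s[:k]
def AInv (cs : List Char) (k : Nat) (st : List Char × Int) : Prop :=
  0 ≤ st.2 ∧ st.2 ≤ (k : Int) ∧
    st.1 ++ (cs.drop st.2.toNat).take (k - st.2.toNat) = (cs.take k).flatMap escA

lemma aStep_none {cs : List Char} {st : List Char × Int} {i : Int}
    (h : aCh2 (PySem.List.pyGetD cs i ' ') = none) : aStep cs st i = st := by
  simp [aStep, h]

lemma aStep_some {cs : List Char} {st : List Char × Int} {i : Int} {e : List Char}
    (h : aCh2 (PySem.List.pyGetD cs i ' ') = some e) :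
    aStep cs st i =
      ((if st.2 < i then st.1 ++ PySem.List.slice cs (some st.2) (some i) else st.1) ++ e,
       i + 1) := by
  simp [aStep, h]

lemma aStep_inv {cs : List Char} {st : List Char × Int} {k : Nat}
    (hk : k < cs.length) (h : AInv cs k st) : AInv cs (k + 1) (aStep cs st (k : Int)) := by
  obtain ⟨s1, sof⟩ := st
  obtain ⟨h0, hle, heq⟩ := h
  simp only at h0 hle heq
  have hsof : sof.toNat ≤ k := by omega
  have hget : PySem.List.pyGetD cs (k : Int) ' ' = cs[k] := by
    rw [PySem.List.pyGetD_of_nonneg _ _ (by positivity), Int.toNat_natCast,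
      List.getD_eq_getElem _ _ hk]
  have htake : (cs.drop sof.toNat).take (k + 1 - sof.toNat)
      = (cs.drop sof.toNat).take (k - sof.toNat) ++ [cs[k]] := by
    rw [show k + 1 - sof.toNat = (k - sof.toNat) + 1 by omega, List.take_add_one]
    congr 1
    rw [List.getElem?_drop, show sof.toNat + (k - sof.toNat) = k by omega,
      List.getElem?_eq_getElem hk]
    rfl
  have hrhs : (cs.take (k + 1)).flatMap escA = (cs.take k).flatMap escA ++ escA cs[k] := by
    rw [List.take_add_one, List.getElem?_eq_getElem hk, List.flatMap_append]
    simp [escA]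
  rcases hch : aCh2 cs[k] with _ | e
  · -- no escape: state unchanged, the pending run grows by one character
    rw [aStep_none (by rw [hget]; exact hch)]
    refine ⟨h0, by push_cast; omega, ?_⟩
    simp only
    rw [htake, hrhs, ← List.append_assoc, heq]
    simp [escA, hch]
  · -- escape: the pending run is flushed and e appended; sofar jumps to k+1
    rw [aStep_some (by rw [hget]; exact hch)]
    have hslice : PySem.List.slice cs (some sof) (some (k : Int))
        = (cs.drop sof.toNat).take (k - sof.toNat) := by
      rw [PySem.List.slice_toNat _ h0 (by positivity), Int.toNat_natCast]
    have hflush : (if sof < (k : Int) then s1 ++ PySem.List.slice cs (some sof) (some (k : Int))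
        else s1) = s1 ++ (cs.drop sof.toNat).take (k - sof.toNat) := by
      split
      · rw [hslice]
      · next hnl =>
          have : sof.toNat = k := by omega
          simp [this]
    refine ⟨by positivity, by push_cast; omega, ?_⟩
    simp only [hflush]
    rw [show ((k : Int) + 1).toNat = k + 1 by omega]
    simp only [Nat.sub_self, List.take_zero, List.append_nil]
    rw [heq, hrhs]
    have he : escA cs[k] = e := by simp [escA, hch]
    rw [he]

lemma loop_inv (cs : List Char) :
    ∀ n : Nat, n ≤ cs.length →
      AInv cs n ((PySem.List.pyRange 0 (n : Int) 1).foldl (aStep cs) ([], 0)) := by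
  intro n
  induction n with
  | zero =>
      intro _
      rw [PySem.List.pyRange_one_eq_nil (by simp)]
      exact ⟨le_refl 0, by simp, by simp⟩
  | succ n ih =>
      intro hn
      have hcast : ((n + 1 : Nat) : Int) = (n : Int) + 1 := by push_cast; ring
      rw [hcast, PySem.List.pyRange_one_succ_right (by positivity), List.foldl_append]
      simpa using aStep_inv (by omega) (ih (by omega))

lemma aFinish_eq (cs : List Char) {st : List Char × Int} (h : AInv cs cs.length st) :
    aFinish cs st = cs.flatMap escA := by
  obtain ⟨h0, hle, heq⟩ := h
  rw [List.take_length] at heq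
  unfold aFinish
  split
  · next hlt =>
      rw [PySem.List.slice_from _ h0]
      have hfull : (cs.drop st.2.toNat).take (cs.length - st.2.toNat) = cs.drop st.2.toNat := by
        apply List.take_of_length_le
        simp
      rw [hfull] at heq
      exact heq
  · next hge =>
      have hz : cs.length - st.2.toNat = 0 := by omega
      rw [hz] at heq
      simpa using heq

-- ===== VERDICT (by name: the statement is the Claim_ definitions above) =====
theorem unctrl_spec : Claim_equal_unctrl := by
  intro s tabsize hdom _hpre
  unfold Spec_unctrl unctrl unctrl_alt
  have hdomS : ∀ c ∈ s.toList, pvDomChar c = true := by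
    intro c hc
    have := (Bool.and_eq_true _ _).mp hdom |>.1
    exact List.all_eq_true.mp this c hc
  rw [aFinish_eq s.toList (loop_inv s.toList s.toList.length (le_refl _)),
    flatMap_escA_eq s.toList hdomS]
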